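-- pv_equiv track=rewrite | github.com/HSleymn/Solution-types-bac-pratique-2023 | 05/ex1.py | paire_6
-- ===== SOURCE A (Python) =====
-- def paire_6(tab):
--     compteur = 0
--     for j in range(len(tab)):
--         if tab[j] == 6:
--             compteur += 1
--         if compteur >= 2 :
--             return True
--     return False
-- ===== SOURCE B (Python) =====
-- def paire_6(tab):
--     tab = list(tab)
--     if 6 not in tab:
--         return False
--     # search for a second 6 only in the part after the first one
--     return 6 in tab[tab.index(6) + 1:]
-- ===== Notes on version B (the rewrite author's own statement) =====
-- stated objective: alternative
-- what changed: Replaced the single index loop with a running counter and early return by a two-phase search: locate the first 6 with index(), then test membership of 6 in the suffix after it.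
import Mathlib
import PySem

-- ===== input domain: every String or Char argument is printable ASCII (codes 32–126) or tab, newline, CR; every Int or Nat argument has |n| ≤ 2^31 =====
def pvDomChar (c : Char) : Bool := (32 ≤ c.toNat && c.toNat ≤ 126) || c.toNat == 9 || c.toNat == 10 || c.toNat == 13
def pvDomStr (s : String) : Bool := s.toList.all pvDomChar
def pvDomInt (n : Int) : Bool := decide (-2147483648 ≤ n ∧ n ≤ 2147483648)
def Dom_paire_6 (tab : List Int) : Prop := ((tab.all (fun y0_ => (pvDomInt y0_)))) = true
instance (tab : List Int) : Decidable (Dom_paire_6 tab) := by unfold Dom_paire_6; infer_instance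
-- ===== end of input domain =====

-- B replaces A's counting scan with a two-phase search (first 6, then 6 in the suffix); alternative decomposition, same cost.


-- ===== PORT A =====
-- loop of A: the counter scan with early return, as structural recursion over the list
def paire6Go : List Int → Int → Bool
  | [], _ => false
  | x :: xs, compteur =>
      let compteur' := if x = 6 then compteur + 1 else compteur
      if compteur' ≥ 2 then true else paire6Go xs compteur'

def paire_6 (tab : List Int) : Bool := paire6Go tab 0

-- ===== PORT B =====
-- B: find the first 6, then look for another 6 only in the suffix after it
def paire_6_alt (tab : List Int) : Bool :=
  if ¬ tab.contains 6 then false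
  else
    match PySem.List.index? tab 6 with
    | none => false
    | some i => (PySem.List.slice tab (some ((i : Int) + 1)) none).contains 6

-- ===== PRECONDITION & SPEC =====
def Spec_paire_6 (tab : List Int) (out : Bool) : Prop := out = paire_6_alt tab
instance (tab : List Int) (out : Bool) : Decidable (Spec_paire_6 tab out) := by unfold Spec_paire_6; infer_instance

-- ===== CLAIM (what is proved, stated in full; the proofs are below) =====
def Claim_equal_paire_6 : Prop := ∀ (tab : List Int), Dom_paire_6 tab → Spec_paire_6 tab (paire_6 tab)

-- ===== LEMMAS AND PROOFS =====
theorem paire6Go_eq_count (tab : List Int) (c : Int) (h0 : 0 ≤ c) (h1 : c ≤ 1) :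
    paire6Go tab c = decide (2 ≤ c + tab.count 6) := by
  induction tab generalizing c with
  | nil => simp [paire6Go]; omega
  | cons x xs ih =>
      by_cases hx : x = 6
      · subst hx
        by_cases hc : c = 1
        · subst hc; simp [paire6Go]; omega
        · have : c = 0 := by omega
          subst this
          simp [paire6Go, ih 1 (by omega) (by omega)]
          constructor <;> (intro; omega)
      · simp [paire6Go, hx, ih c h0 h1]
        intro h
        have := Int.natCast_nonneg (xs.count 6)
        omega

theorem paire_6_alt_eq_count (tab : List Int) :
    paire_6_alt tab = decide (2 ≤ (tab.count 6 : Int)) := by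
  induction tab with
  | nil => simp [paire_6_alt]
  | cons x xs ih =>
      by_cases hx : x = 6
      · subst hx
        rw [paire_6_alt, PySem.List.index?_cons_self]
        have hs : PySem.List.slice (6 :: xs) (some (((0:Nat) : Int) + 1)) none = xs := by
          rw [PySem.List.slice_from _ (by omega)]; simp
        rw [if_neg (by simp)]
        simp only [hs, List.count_cons_self, List.contains_eq_mem,
          ← List.count_pos_iff, decide_eq_decide]
        push_cast
        omega
      · rw [paire_6_alt, PySem.List.index?_cons_of_ne xs hx]
        by_cases hm : (6 : Int) ∈ xs
        · obtain ⟨i, hi⟩ := (PySem.List.index?_isSome_iff xs 6).2 hm |> Option.isSome_iff_exists.1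
          rw [paire_6_alt] at ih
          rw [hi]
          have hmem : (6 : Int) ∈ x :: xs := List.mem_cons_of_mem _ hm
          have hslice : PySem.List.slice (x :: xs) (some (((i : Int) + 1) + 1)) none
              = PySem.List.slice xs (some ((i : Int) + 1)) none := by
            rw [PySem.List.slice_from _ (by positivity), PySem.List.slice_from _ (by positivity)]
            have h2 : (((i : Int) + 1 + 1)).toNat = ((i : Int) + 1).toNat + 1 := by omega
            simp [h2]
          simp only [Option.map_some]
          rw [if_neg (by simp [hmem])]
          push_cast
          rw [hslice]
          rw [if_neg (by simp [hm]), hi] at ih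
          rw [List.count_cons_of_ne hx]
          exact ih
        · have hnone : PySem.List.index? xs 6 = none := (PySem.List.index?_eq_none_iff xs 6).2 hm
          rw [if_pos (by simp [hm, Ne.symm hx])]
          have hc : xs.count 6 = 0 := List.count_eq_zero.2 hm
          rw [List.count_cons_of_ne hx, hc]
          simp

-- ===== VERDICT (by name: the statement is the Claim_ definition above) =====
theorem paire_6_spec : Claim_equal_paire_6 := by
  intro tab _
  unfold Spec_paire_6 paire_6
  rw [paire6Go_eq_count tab 0 (by omega) (by omega), paire_6_alt_eq_count]
  simp
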